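-- pv_equiv track=rewrite | github.com/rhomspuron/sardana | src/sardana/macroserver/macros/test/test_scanct.py | parsingOutputPoints
-- ===== SOURCE A (Python) =====
-- def parsingOutputPoints(log_output):
--     """A helper method to know if points are ordered based on log_output.
--     """
--     first_data_line = 1
--     scan_index = 0
--     list_points = []
--     for line, in log_output[first_data_line:]:
--         # Get a list of elements without white spaces between them
--         columns = line.split()
--
--         # Cast index of scan to int (the first element of the list)
--         columns[scan_index] = int(columns[scan_index])
--         list_points.append(columns[scan_index])
--     nb_points = len(list_points)
--
--     ordered_points = 0
--     for i in range(len(list_points) - 1):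
--         if list_points[i + 1] >= list_points[i]:
--             ordered_points = 1
--         else:
--             ordered_points = 0
--             break
--
--     return (nb_points, ordered_points)
-- ===== SOURCE B (Python) =====
-- def parsingOutputPoints(log_output):
--     """Single pass: count points and track ordering with a sticky flag."""
--     nb_points = 0
--     prev = None
--     ordered_points = 0
--     broken = False
--     for line, in log_output[1:]:
--         val = int(line.split()[0])
--         nb_points += 1
--         if prev is not None and not broken:
--             if val >= prev:
--                 ordered_points = 1
--             else:
--                 ordered_points = 0
--                 broken = True
--         prev = val
--     return (nb_points, ordered_points)
-- ===== Notes on version B (the rewrite author's own statement) =====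
-- stated objective: alternative
-- what changed: Replaces A's two phases (build a list of parsed indices, then a second indexed loop with break) by one streaming pass that keeps only a count, the previous value and a sticky ordered flag, never materializing the list of points.
import Mathlib
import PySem

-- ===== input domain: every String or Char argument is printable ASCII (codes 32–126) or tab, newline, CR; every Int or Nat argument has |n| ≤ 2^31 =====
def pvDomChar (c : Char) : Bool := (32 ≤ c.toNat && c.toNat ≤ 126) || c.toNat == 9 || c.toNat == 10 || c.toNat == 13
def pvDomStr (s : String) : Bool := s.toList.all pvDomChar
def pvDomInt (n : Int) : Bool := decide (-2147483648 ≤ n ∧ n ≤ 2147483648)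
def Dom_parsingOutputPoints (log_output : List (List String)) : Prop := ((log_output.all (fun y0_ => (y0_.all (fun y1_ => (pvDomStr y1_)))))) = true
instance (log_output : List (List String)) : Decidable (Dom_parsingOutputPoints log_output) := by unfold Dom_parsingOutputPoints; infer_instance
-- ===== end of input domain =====

-- B replaces A's two phases (materialize the parsed index list, then an indexed break loop)
-- by one streaming pass keeping a count, the previous value and a sticky ordered flag (alternative decomposition).


-- ===== PORT A =====
-- int(line.split()[0]) for a one-element row; Pre_ guarantees the defaults are never taken
def pvRowVal (row : List String) : Int :=
  (PySem.Int.ofStr? ((PySem.Str.split₀ (row.headD "")).headD "")).getD 0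

-- 'for i in range(len(list_points) - 1): if pts[i+1] >= pts[i]: ordered = 1 else: ordered = 0; break',
-- rendered as structural recursion on the suffix of adjacent pairs (same comparisons, same break)
def pvOrderedA : List Int → Int → Int
  | a :: b :: r, _ => if b ≥ a then pvOrderedA (b :: r) 1 else 0
  | _, ord => ord

def parsingOutputPoints (log_output : List (List String)) : Int × Int :=
  let list_points : List Int :=
    (PySem.List.slice log_output (some 1) none).foldl
      (fun acc row => acc ++ [pvRowVal row]) []
  let nb_points : Int := list_points.length
  let ordered_points : Int := pvOrderedA list_points 0
  (nb_points, ordered_points)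

-- ===== PORT B =====
-- state: (nb_points, prev, ordered_points, broken)
def pvStepB : (Int × Option Int × Int × Bool) → Int → Int × Option Int × Int × Bool
  | (nb, prev, ordered, broken), v =>
    match prev with
    | none => (nb + 1, some v, ordered, broken)
    | some p =>
      if broken then (nb + 1, some v, ordered, broken)
      else if v ≥ p then (nb + 1, some v, 1, broken)
      else (nb + 1, some v, 0, true)

def parsingOutputPoints_alt (log_output : List (List String)) : Int × Int :=
  let st :=
    (PySem.List.slice log_output (some 1) none).foldl
      (fun st row => pvStepB st (pvRowVal row)) ((0 : Int), none, (0 : Int), false)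
  (st.1, st.2.2.1)

-- ===== PRECONDITION & SPEC =====
-- Pre_ excludes exactly the inputs where Python A raises: a data row that is not a 1-tuple
-- (unpacking 'line,' fails), an all-whitespace line (IndexError on split()[0]), or a first
-- token int() rejects (ValueError).
def Pre_parsingOutputPoints (log_output : List (List String)) : Prop :=
  ∀ row ∈ log_output.drop 1,
    row.length = 1 ∧
    (PySem.Int.ofStr? ((PySem.Str.split₀ (row.headD "")).headD "")).isSome = true
instance (log_output : List (List String)) : Decidable (Pre_parsingOutputPoints log_output) := by unfold Pre_parsingOutputPoints; infer_instance

def pvWitness_parsingOutputPoints : List (List String) :=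
  [["Pt No  Pos"], ["1 2.0"], ["2 3.5"]]

def Spec_parsingOutputPoints (log_output : List (List String)) (out : Int × Int) : Prop := out = parsingOutputPoints_alt log_output
instance (log_output : List (List String)) (out : Int × Int) : Decidable (Spec_parsingOutputPoints log_output out) := by unfold Spec_parsingOutputPoints; infer_instance

-- ===== CLAIM (what is proved, stated in full; the proofs are below) =====
def Claim_equal_parsingOutputPoints : Prop := ∀ (log_output : List (List String)), Dom_parsingOutputPoints log_output → Pre_parsingOutputPoints log_output → Spec_parsingOutputPoints log_output (parsingOutputPoints log_output)

-- ===== LEMMAS AND PROOFS =====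

-- adjacent non-decreasing, as a Bool (proof-side helper only)
def pvChain : List Int → Bool
  | a :: b :: r => decide (a ≤ b) && pvChain (b :: r)
  | _ => true

-- A's first loop builds exactly the mapped list
theorem pvApp_eq_map (l : List (List String)) (acc : List Int) :
    l.foldl (fun acc row => acc ++ [pvRowVal row]) acc = acc ++ l.map pvRowVal := by
  induction l generalizing acc with
  | nil => simp
  | cons x xs ih => simp [List.foldl_cons, ih]

-- once broken, B only counts
theorem pvFoldB_broken (rest : List Int) (nb : Int) (p : Option Int) (ord : Int) :
    (rest.foldl pvStepB (nb, p, ord, true)).1 = nb + rest.length ∧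
    (rest.foldl pvStepB (nb, p, ord, true)).2.2.1 = ord := by
  induction rest generalizing nb p with
  | nil => simp
  | cons v t ih =>
    have := ih (nb + 1) (some v)
    cases p <;>
      simp only [List.foldl_cons, pvStepB, if_true, List.length_cons] <;>
      refine ⟨?_, this.2⟩ <;> rw [this.1] <;> push_cast <;> ring

-- main invariant of B's fold while unbroken
theorem pvFoldB_ok (rest : List Int) (a nb ord : Int) :
    (rest.foldl pvStepB (nb, some a, ord, false)).1 = nb + rest.length ∧
    (rest.foldl pvStepB (nb, some a, ord, false)).2.2.1 =
      if pvChain (a :: rest) then (if rest.isEmpty then ord else 1) else 0 := by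
  induction rest generalizing a nb ord with
  | nil => simp [pvChain]
  | cons b t ih =>
    by_cases h : a ≤ b
    · have := ih b (nb + 1) 1
      refine ⟨?_, ?_⟩
      · simp only [List.foldl_cons, pvStepB, ge_iff_le, h, if_true, Bool.false_eq_true,
          if_false, List.length_cons]
        rw [this.1]; push_cast; ring
      · simp only [List.foldl_cons, pvStepB, ge_iff_le, h, if_true, Bool.false_eq_true,
          if_false]
        rw [this.2]
        simp only [pvChain, decide_eq_true h, Bool.true_and]
        rcases t with _ | ⟨c, t⟩ <;> simp
    · have hb := pvFoldB_broken t (nb + 1) (some b) 0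
      refine ⟨?_, ?_⟩
      · simp only [List.foldl_cons, pvStepB, ge_iff_le, h, if_false, Bool.false_eq_true,
          List.length_cons]
        rw [hb.1]; push_cast; ring
      · simp only [List.foldl_cons, pvStepB, ge_iff_le, h, if_false, Bool.false_eq_true]
        rw [hb.2]
        simp [pvChain, h]

-- characterization of A's break loop
theorem pvOrderedA_eq (rest : List Int) (a ord : Int) :
    pvOrderedA (a :: rest) ord =
      if pvChain (a :: rest) then (if rest.isEmpty then ord else 1) else 0 := by
  induction rest generalizing a ord with
  | nil => simp [pvOrderedA, pvChain]
  | cons b t ih =>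
    by_cases h : a ≤ b
    · simp only [pvOrderedA, ge_iff_le, h, if_true, ih b 1, pvChain, decide_eq_true h]
      rcases t with _ | ⟨c, t⟩ <;> simp
    · simp [pvOrderedA, h, pvChain]

-- the two ports compute the same pair from the parsed points
theorem pv_agree (pts : List Int) :
    ((pts.length : Int), pvOrderedA pts 0) =
      ((pts.foldl pvStepB ((0 : Int), none, (0 : Int), false)).1,
       (pts.foldl pvStepB ((0 : Int), none, (0 : Int), false)).2.2.1) := by
  cases pts with
  | nil => simp [pvOrderedA]
  | cons a rest =>
    have h := pvFoldB_ok rest a 1 0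
    have hA := pvOrderedA_eq rest a 0
    simp only [List.foldl_cons, pvStepB, zero_add]
    refine Prod.ext ?_ ?_
    · rw [h.1, List.length_cons]; push_cast; ring
    · rw [hA, h.2]

-- ===== VERDICT (by name: the statement is the Claim_ definition above) =====
theorem parsingOutputPoints_spec : Claim_equal_parsingOutputPoints := by
  intro log_output _ _
  unfold Spec_parsingOutputPoints parsingOutputPoints parsingOutputPoints_alt
  have h := pv_agree ((PySem.List.slice log_output (some 1) none).map pvRowVal)
  rw [List.foldl_map] at h
  rw [pvApp_eq_map, List.nil_append]
  exact h
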